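-- pv_equiv track=rewrite | github.com/snhansen/adventofcode | 2017/day20/solution.py | remove_collisions
-- ===== SOURCE A (Python) =====
-- def remove_collisions(particles):
--     new_particles = []
--     for i in range(len(particles)):
--         add = True
--         for j in range(len(particles)):
--             if i == j:
--                 continue
--             if particles[i][0] == particles[j][0]:
--                 add = False
--                 break
--         if add:
--             new_particles.append(particles[i])
--     return new_particles
-- ===== SOURCE B (Python) =====
-- def remove_collisions(particles):
--     counts = {}
--     for p in particles:
--         key = tuple(p[0])
--         counts[key] = counts.get(key, 0) + 1
--     return [p for p in particles if counts[tuple(p[0])] == 1]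
-- ===== Notes on version B (the rewrite author's own statement) =====
-- stated objective: faster
-- what changed: Replaces A's quadratic all-pairs scan by one counting pass that builds a dict of position multiplicities, then keeps the particles whose position count is 1.
-- outside the precondition, e.g. on remove_collisions([[]]): A returns [[]], B raises IndexError
import Mathlib
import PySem

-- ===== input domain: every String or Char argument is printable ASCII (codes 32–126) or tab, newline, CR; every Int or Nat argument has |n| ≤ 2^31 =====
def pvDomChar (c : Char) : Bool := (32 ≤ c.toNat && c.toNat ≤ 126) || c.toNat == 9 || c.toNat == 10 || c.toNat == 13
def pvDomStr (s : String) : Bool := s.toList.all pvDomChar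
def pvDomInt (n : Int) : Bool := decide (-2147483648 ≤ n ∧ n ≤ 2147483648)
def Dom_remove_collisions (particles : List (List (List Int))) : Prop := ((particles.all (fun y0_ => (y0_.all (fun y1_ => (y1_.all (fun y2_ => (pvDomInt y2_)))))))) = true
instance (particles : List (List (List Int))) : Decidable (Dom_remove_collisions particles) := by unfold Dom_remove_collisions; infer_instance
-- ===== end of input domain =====

-- B replaces A's quadratic all-pairs scan with a single counting pass over positions (O(n) dict counter); return-value equivalence proved on inputs where every particle is nonempty.


-- ===== PORT A =====
-- inner 'for j in range(len(particles))' loop with its break, as recursion over the remaining j's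
def rcInner (particles : List (List (List Int))) (i : Int) : List Int → Bool
  | [] => true
  | j :: js =>
    if i == j then rcInner particles i js
    else if PySem.List.pyGetD (PySem.List.pyGetD particles i []) 0 ([] : List Int)
            == PySem.List.pyGetD (PySem.List.pyGetD particles j []) 0 ([] : List Int) then false
    else rcInner particles i js

def remove_collisions (particles : List (List (List Int))) : List (List (List Int)) :=
  (PySem.List.pyRange 0 particles.length 1).foldl
    (fun new_particles i =>
      let add := rcInner particles i (PySem.List.pyRange 0 particles.length 1)
      if add then new_particles ++ [PySem.List.pyGetD particles i []] else new_particles)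
    []

-- ===== PORT B =====
-- tuple(p[0]) : the particle's position, used as dict key
def rcKey (p : List (List Int)) : List Int := PySem.List.pyGetD p 0 []

def remove_collisions_alt (particles : List (List (List Int))) : List (List (List Int)) :=
  let counts : PySem.Dict (List Int) Int :=
    particles.foldl (fun d p => d.modify (rcKey p) 0 (· + 1)) PySem.Dict.empty
  particles.filter (fun p => counts.getD (rcKey p) 0 == 1)

-- ===== PRECONDITION & SPEC =====
-- Pre_ excludes inputs containing an empty particle (no position): there Python A raises IndexError
-- whenever len(particles) ≥ 2, and B raises IndexError always (on [[ ]] A returns [[ ]] while B raises).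
def Pre_remove_collisions (particles : List (List (List Int))) : Prop :=
  ∀ p ∈ particles, p ≠ []
instance (particles : List (List (List Int))) : Decidable (Pre_remove_collisions particles) := by
  unfold Pre_remove_collisions; infer_instance

def pvWitness_remove_collisions : List (List (List Int)) :=
  [[[1, 2, 3], [0, 0, 0], [0, 0, 0]], [[4, 5, 6], [0, 0, 0], [0, 0, 0]]]

def Spec_remove_collisions (particles : List (List (List Int))) (out : List (List (List Int))) : Prop := out = remove_collisions_alt particles
instance (particles : List (List (List Int))) (out : List (List (List Int))) : Decidable (Spec_remove_collisions particles out) := by unfold Spec_remove_collisions; infer_instance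

-- ===== CLAIM (what is proved, stated in full; the proofs are below) =====
def Claim_equal_remove_collisions : Prop := ∀ (particles : List (List (List Int))), Dom_remove_collisions particles → Pre_remove_collisions particles → Spec_remove_collisions particles (remove_collisions particles)

-- ===== LEMMAS AND PROOFS =====

-- the inner loop (with break) decides 'no other index has an equal position'
lemma rcInner_eq_any (particles : List (List (List Int))) (i : Int) (js : List Int) :
    rcInner particles i js
      = !(js.any (fun j => (i != j) &&
          (PySem.List.pyGetD (PySem.List.pyGetD particles i []) 0 ([] : List Int)
            == PySem.List.pyGetD (PySem.List.pyGetD particles j []) 0 []))) := by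
  induction js with
  | nil => simp [rcInner]
  | cons j js ih =>
    by_cases h : i = j
    · subst h; simp [rcInner, ih]
    · by_cases h2 : PySem.List.pyGetD (PySem.List.pyGetD particles i []) 0 ([] : List Int)
            = PySem.List.pyGetD (PySem.List.pyGetD particles j []) 0 []
      · simp [rcInner, h, h2]
      · simp [rcInner, h, h2, ih]

-- 'some OTHER element satisfies q' is 'q holds at least twice', on a nodup list at a point where q holds
lemma any_other_eq_countP (l : List Int) (i : Int) (q : Int → Bool)
    (hnd : l.Nodup) (hi : i ∈ l) (hq : q i = true) :
    (!(l.any (fun j => (i != j) && q j))) = (l.countP q == 1) := by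
  have hperm := List.perm_cons_erase hi
  have hcount : l.countP q = (l.erase i).countP q + 1 := by
    rw [hperm.countP_eq]; simp [hq]
  have h1 : (l.any (fun j => (i != j) && q j) = true) ↔ 0 < (l.erase i).countP q := by
    rw [List.any_eq_true, List.countP_pos_iff]
    constructor
    · rintro ⟨j, hj, hjq⟩
      simp only [Bool.and_eq_true, bne_iff_ne] at hjq
      exact ⟨j, (List.Nodup.mem_erase_iff hnd).mpr ⟨fun h => hjq.1 h.symm, hj⟩, hjq.2⟩
    · rintro ⟨j, hj, hjq⟩
      rcases (List.Nodup.mem_erase_iff hnd).mp hj with ⟨hne, hmem⟩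
      refine ⟨j, hmem, ?_⟩
      simp only [Bool.and_eq_true, bne_iff_ne, hjq, and_true]
      exact fun h => hne h.symm
  rcases Nat.eq_zero_or_pos ((l.erase i).countP q) with h0 | hpos
  · have : l.any (fun j => (i != j) && q j) = false := by
      cases h : l.any (fun j => (i != j) && q j)
      · rfl
      · exact absurd (h1.mp h) (by omega)
    simp [this, hcount, h0]
  · have h2 : l.any (fun j => (i != j) && q j) = true := h1.mpr hpos
    simp only [h2, Bool.not_true]
    have : l.countP q ≠ 1 := by omega
    simp [this]

lemma natCast_beq_one (c : Nat) : (((c : Int)) == (1 : Int)) = (c == 1) := by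
  rcases c with _ | c
  · decide
  · rcases c with _ | c
    · decide
    · simp
      omega

-- B's counting loop, keyed by position, is the counting loop over the list of positions
lemma foldl_modify_key (l : List (List (List Int))) (d : PySem.Dict (List Int) Int) :
    l.foldl (fun d p => d.modify (PySem.List.pyGetD p 0 []) 0 (· + 1)) d
      = (l.map (fun p => PySem.List.pyGetD p 0 ([] : List Int))).foldl
          (fun d x => d.modify x 0 (· + 1)) d := by
  induction l generalizing d with
  | nil => rfl
  | cons p l ih => simp [ih]

-- filtering elements via their indices is filtering the list
lemma filter_index {α : Type} (xs : List α) (d : α) (P : α → Bool) :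
    ((PySem.List.pyRange 0 xs.length 1).filter
        (fun i => P (PySem.List.pyGetD xs i d))).map (fun i => PySem.List.pyGetD xs i d)
      = xs.filter P := by
  conv_rhs => rw [← PySem.List.map_pyGetD_pyRange_zero' xs d]
  rw [List.filter_map]
  simp only [Function.comp_def]

-- ===== VERDICT (by name: the statement is the Claim_ definition above) =====
theorem remove_collisions_spec : Claim_equal_remove_collisions := by
  intro particles _hdom _hpre
  unfold Spec_remove_collisions
  have hB : remove_collisions_alt particles
      = particles.filter (fun p =>
          (particles.map (fun p => PySem.List.pyGetD p 0 ([] : List Int))).count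
            (PySem.List.pyGetD p 0 []) == 1) := by
    simp only [remove_collisions_alt, rcKey]
    rw [foldl_modify_key]
    refine List.filter_congr ?_
    intro p _
    rw [PySem.Dict.getD_foldl_modify_add_one]
    simp [natCast_beq_one]
  have hA : remove_collisions particles
      = ((PySem.List.pyRange 0 particles.length 1).filter
          (fun i =>
            (particles.map (fun p => PySem.List.pyGetD p 0 ([] : List Int))).count
              (PySem.List.pyGetD (PySem.List.pyGetD particles i []) 0 []) == 1)).map
          (fun i => PySem.List.pyGetD particles i []) := by
    unfold remove_collisions
    rw [PySem.List.foldl_append_if, List.nil_append]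
    congr 1
    refine List.filter_congr ?_
    intro i hi
    rw [rcInner_eq_any]
    rw [any_other_eq_countP (PySem.List.pyRange 0 particles.length 1) i
          (fun j => PySem.List.pyGetD (PySem.List.pyGetD particles i []) 0 ([] : List Int)
            == PySem.List.pyGetD (PySem.List.pyGetD particles j []) 0 [])
          (PySem.List.nodup_pyRange_one 0 particles.length) hi (by simp)]
    congr 1
    rw [List.countP_congr (q := fun j =>
          PySem.List.pyGetD (PySem.List.pyGetD particles j []) 0 ([] : List Int)
            == PySem.List.pyGetD (PySem.List.pyGetD particles i []) 0 [])
      (by intro j _; simp only [beq_iff_eq]; exact eq_comm)]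
    rw [show (fun j => PySem.List.pyGetD (PySem.List.pyGetD particles j []) 0 ([] : List Int)
            == PySem.List.pyGetD (PySem.List.pyGetD particles i []) 0 [])
          = ((fun x => x == PySem.List.pyGetD (PySem.List.pyGetD particles i []) 0 ([] : List Int))
              ∘ (fun j => PySem.List.pyGetD (PySem.List.pyGetD particles j []) 0 ([] : List Int)))
        from rfl]
    rw [← List.countP_map]
    rw [show (fun j => PySem.List.pyGetD (PySem.List.pyGetD particles j []) 0 ([] : List Int))
          = ((fun p => PySem.List.pyGetD p 0 ([] : List Int))
              ∘ (fun j => PySem.List.pyGetD particles j ([] : List (List Int))))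
        from rfl]
    rw [← List.map_map, PySem.List.map_pyGetD_pyRange_zero']
    rfl
  rw [hA, hB]
  exact filter_index particles []
    (fun p => (particles.map (fun p => PySem.List.pyGetD p 0 ([] : List Int))).count
        (PySem.List.pyGetD p 0 []) == 1)
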